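-- pv_equiv track=rewrite | github.com/TheVTV/pliki-matura | KW21/KW21/zad2.2.py | jaki_system
-- ===== SOURCE A (Python) =====
-- def jaki_system(n):
--     m = 0
--     for i in n:
--         if i == "F" and m < 16:
--             m = 16
--         elif i == "E" and m < 15:
--             m = 15
--         elif i == "D" and m < 14:
--             m = 14
--         elif i == "C" and m < 13:
--             m = 13
--         elif i == "B" and m < 12:
--             m = 12
--         elif i == "A" and m < 11:
--             m = 11
--         elif i == "9" and m < 10:
--             m = 10
--         elif i == "8" and m < 9:
--             m = 9
--         elif i == "7" and m < 8:
--             m = 8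
--         elif i == "6" and m < 7:
--             m = 7
--         elif i == "5" and m < 6:
--             m = 6
--         elif i == "4" and m < 5:
--             m = 5
--         elif i == "3" and m < 4:
--             m = 4
--         elif i == "2" and m < 3:
--             m = 3
--         elif (i == "1" or i == "0") and m < 2:
--             m = 2
--     return m
-- ===== SOURCE B (Python) =====
-- _BASES = [('F', 16), ('E', 15), ('D', 14), ('C', 13), ('B', 12), ('A', 11),
--           ('9', 10), ('8', 9), ('7', 8), ('6', 7), ('5', 6), ('4', 5),
--           ('3', 4), ('2', 3)]
--
-- def jaki_system(n):
--     for c, b in _BASES: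
--         if c in n:
--             return b
--     return 2 if ('0' in n or '1' in n) else 0
-- ===== Notes on version B (the rewrite author's own statement) =====
-- stated objective: faster
-- what changed: A scans every character in Python updating a running maximum through a 16-way elif chain; B instead iterates over a fixed highest-to-lowest table of (digit, base) pairs and returns the first base whose digit occurs in the string (substring membership), falling back to base 2 if a binary digit is present and to 0 otherwise.
import Mathlib
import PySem

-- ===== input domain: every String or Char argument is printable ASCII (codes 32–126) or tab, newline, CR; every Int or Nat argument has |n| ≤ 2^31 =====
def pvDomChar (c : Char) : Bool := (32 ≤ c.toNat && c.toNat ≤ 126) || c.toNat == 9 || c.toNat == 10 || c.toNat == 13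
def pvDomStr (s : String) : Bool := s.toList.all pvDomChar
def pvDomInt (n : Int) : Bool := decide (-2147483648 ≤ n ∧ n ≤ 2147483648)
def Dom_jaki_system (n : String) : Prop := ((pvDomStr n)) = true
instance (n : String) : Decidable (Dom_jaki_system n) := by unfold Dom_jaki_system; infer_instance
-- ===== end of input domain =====

set_option maxHeartbeats 2000000

-- B replaces A's per-character running-maximum elif chain by a loop over the candidate
-- bases from highest to lowest that returns the first base whose digit occurs in the
-- string (objective: faster by a constant factor, measured).

-- ===== PORT A =====
-- one step of A's loop body: the elif chain updating m for character i
def pvStepA (m : Int) (i : Char) : Int :=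
  if i = 'F' ∧ m < 16 then 16
  else if i = 'E' ∧ m < 15 then 15
  else if i = 'D' ∧ m < 14 then 14
  else if i = 'C' ∧ m < 13 then 13
  else if i = 'B' ∧ m < 12 then 12
  else if i = 'A' ∧ m < 11 then 11
  else if i = '9' ∧ m < 10 then 10
  else if i = '8' ∧ m < 9 then 9
  else if i = '7' ∧ m < 8 then 8
  else if i = '6' ∧ m < 7 then 7
  else if i = '5' ∧ m < 6 then 6
  else if i = '4' ∧ m < 5 then 5
  else if i = '3' ∧ m < 4 then 4
  else if i = '2' ∧ m < 3 then 3
  else if (i = '1' ∨ i = '0') ∧ m < 2 then 2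
  else m

def jaki_system (n : String) : Int := n.toList.foldl pvStepA 0

-- ===== PORT B =====
-- Source B's _BASES table
def pvBases : List (Char × Int) :=
  [('F', 16), ('E', 15), ('D', 14), ('C', 13), ('B', 12), ('A', 11),
   ('9', 10), ('8', 9), ('7', 8), ('6', 7), ('5', 6), ('4', 5), ('3', 4), ('2', 3)]

-- Source B's loop over the base table with early return, then the final '0'/'1' check
def pvScanB (l : List Char) : List (Char × Int) → Int
  | [] => if '0' ∈ l ∨ '1' ∈ l then 2 else 0
  | (c, b) :: rest => if c ∈ l then b else pvScanB l rest

def jaki_system_alt (n : String) : Int := pvScanB n.toList pvBases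

-- ===== PRECONDITION & SPEC =====
def Spec_jaki_system (n : String) (out : Int) : Prop := out = jaki_system_alt n
instance (n : String) (out : Int) : Decidable (Spec_jaki_system n out) := by unfold Spec_jaki_system; infer_instance

-- ===== CLAIM (what is proved, stated in full; the proofs are below) =====
def Claim_equal_jaki_system : Prop := ∀ (n : String), Dom_jaki_system n → Spec_jaki_system n (jaki_system n)

-- ===== LEMMAS AND PROOFS =====

-- the minimal-base value of one character (0 for characters that are not 0-9A-F uppercase)
def pvVal (i : Char) : Int :=
  if i = 'F' then 16 else if i = 'E' then 15 else if i = 'D' then 14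
  else if i = 'C' then 13 else if i = 'B' then 12 else if i = 'A' then 11
  else if i = '9' then 10 else if i = '8' then 9 else if i = '7' then 8
  else if i = '6' then 7 else if i = '5' then 6 else if i = '4' then 5
  else if i = '3' then 4 else if i = '2' then 3 else if i = '1' ∨ i = '0' then 2 else 0

-- every character is one of the 16 digits or none of them
lemma pvChar_cases (i : Char) :
    i = 'F' ∨ i = 'E' ∨ i = 'D' ∨ i = 'C' ∨ i = 'B' ∨ i = 'A' ∨ i = '9' ∨ i = '8' ∨
    i = '7' ∨ i = '6' ∨ i = '5' ∨ i = '4' ∨ i = '3' ∨ i = '2' ∨ i = '1' ∨ i = '0' ∨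
    (i ≠ 'F' ∧ i ≠ 'E' ∧ i ≠ 'D' ∧ i ≠ 'C' ∧ i ≠ 'B' ∧ i ≠ 'A' ∧ i ≠ '9' ∧ i ≠ '8' ∧
     i ≠ '7' ∧ i ≠ '6' ∧ i ≠ '5' ∧ i ≠ '4' ∧ i ≠ '3' ∧ i ≠ '2' ∧ i ≠ '1' ∧ i ≠ '0') := by
  by_cases hF : i = 'F'; · tauto
  by_cases hE : i = 'E'; · tauto
  by_cases hD : i = 'D'; · tauto
  by_cases hC : i = 'C'; · tauto
  by_cases hB : i = 'B'; · tauto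
  by_cases hA : i = 'A'; · tauto
  by_cases h9 : i = '9'; · tauto
  by_cases h8 : i = '8'; · tauto
  by_cases h7 : i = '7'; · tauto
  by_cases h6 : i = '6'; · tauto
  by_cases h5 : i = '5'; · tauto
  by_cases h4 : i = '4'; · tauto
  by_cases h3 : i = '3'; · tauto
  by_cases h2 : i = '2'; · tauto
  by_cases h1 : i = '1'; · tauto
  by_cases h0 : i = '0'; · tauto
  tauto

lemma pvVal_default (i : Char)
    (hd : i ≠ 'F' ∧ i ≠ 'E' ∧ i ≠ 'D' ∧ i ≠ 'C' ∧ i ≠ 'B' ∧ i ≠ 'A' ∧ i ≠ '9' ∧ i ≠ '8' ∧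
     i ≠ '7' ∧ i ≠ '6' ∧ i ≠ '5' ∧ i ≠ '4' ∧ i ≠ '3' ∧ i ≠ '2' ∧ i ≠ '1' ∧ i ≠ '0') :
    pvVal i = 0 := by
  obtain ⟨n1,n2,n3,n4,n5,n6,n7,n8,n9,n10,n11,n12,n13,n14,n15,n16⟩ := hd
  unfold pvVal
  simp [n1,n2,n3,n4,n5,n6,n7,n8,n9,n10,n11,n12,n13,n14,n15,n16]

lemma pvVal_F : pvVal 'F' = 16 := by decide
lemma pvVal_E : pvVal 'E' = 15 := by decide
lemma pvVal_D : pvVal 'D' = 14 := by decide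
lemma pvVal_C : pvVal 'C' = 13 := by decide
lemma pvVal_B : pvVal 'B' = 12 := by decide
lemma pvVal_A : pvVal 'A' = 11 := by decide
lemma pvVal_9 : pvVal '9' = 10 := by decide
lemma pvVal_8 : pvVal '8' = 9 := by decide
lemma pvVal_7 : pvVal '7' = 8 := by decide
lemma pvVal_6 : pvVal '6' = 7 := by decide
lemma pvVal_5 : pvVal '5' = 6 := by decide
lemma pvVal_4 : pvVal '4' = 5 := by decide
lemma pvVal_3 : pvVal '3' = 4 := by decide
lemma pvVal_2 : pvVal '2' = 3 := by decide
lemma pvVal_1 : pvVal '1' = 2 := by decide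
lemma pvVal_0 : pvVal '0' = 2 := by decide

-- one step of A's loop is "max with the character's value"
lemma pvStepA_eq_max (m : Int) (i : Char) (hm : 0 ≤ m) : pvStepA m i = max m (pvVal i) := by
  rcases pvChar_cases i with rfl|rfl|rfl|rfl|rfl|rfl|rfl|rfl|rfl|rfl|rfl|rfl|rfl|rfl|rfl|rfl|hd
  · rw [pvVal_F]; unfold pvStepA; simp; omega
  · rw [pvVal_E]; unfold pvStepA; simp; omega
  · rw [pvVal_D]; unfold pvStepA; simp; omega
  · rw [pvVal_C]; unfold pvStepA; simp; omega
  · rw [pvVal_B]; unfold pvStepA; simp; omega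
  · rw [pvVal_A]; unfold pvStepA; simp; omega
  · rw [pvVal_9]; unfold pvStepA; simp; omega
  · rw [pvVal_8]; unfold pvStepA; simp; omega
  · rw [pvVal_7]; unfold pvStepA; simp; omega
  · rw [pvVal_6]; unfold pvStepA; simp; omega
  · rw [pvVal_5]; unfold pvStepA; simp; omega
  · rw [pvVal_4]; unfold pvStepA; simp; omega
  · rw [pvVal_3]; unfold pvStepA; simp; omega
  · rw [pvVal_2]; unfold pvStepA; simp; omega
  · rw [pvVal_1]; unfold pvStepA; simp; omega
  · rw [pvVal_0]; unfold pvStepA; simp; omega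
  · rw [pvVal_default i hd]
    obtain ⟨n1,n2,n3,n4,n5,n6,n7,n8,n9,n10,n11,n12,n13,n14,n15,n16⟩ := hd
    unfold pvStepA
    simp [n1,n2,n3,n4,n5,n6,n7,n8,n9,n10,n11,n12,n13,n14,n15,n16]
    omega

def pvMaxF (l : List Char) : Int := l.foldl (fun m i => max m (pvVal i)) 0

-- A's fold equals the max-of-values fold
lemma pvFoldA_eq : ∀ (l : List Char) (m : Int), 0 ≤ m →
    l.foldl pvStepA m = l.foldl (fun m i => max m (pvVal i)) m
  | [], _, _ => rfl
  | c :: t, m, hm => by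
    simp only [List.foldl_cons]
    rw [pvStepA_eq_max m c hm]
    exact pvFoldA_eq t _ (le_trans hm (le_max_left _ _))

lemma pvMaxF_init_le : ∀ (l : List Char) (m : Int), m ≤ l.foldl (fun m i => max m (pvVal i)) m
  | [], _ => le_rfl
  | _ :: t, _ => le_trans (le_max_left _ _) (pvMaxF_init_le t _)

lemma pvMaxF_mem_le : ∀ (l : List Char) (i : Char), i ∈ l → ∀ (m : Int),
    pvVal i ≤ l.foldl (fun m i => max m (pvVal i)) m
  | c :: t, i, h, m => by
    rcases List.mem_cons.mp h with rfl | h'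
    · exact le_trans (le_max_right _ _) (pvMaxF_init_le t _)
    · exact pvMaxF_mem_le t i h' _

lemma pvMaxF_le (K : Int) : ∀ (l : List Char), (∀ i ∈ l, pvVal i ≤ K) → ∀ (m : Int), m ≤ K →
    l.foldl (fun m i => max m (pvVal i)) m ≤ K
  | [], _, _, hm => hm
  | c :: t, hub, _, hm =>
    pvMaxF_le K t (fun i hi => hub i (List.mem_cons_of_mem _ hi)) _
      (max_le hm (hub c List.mem_cons_self))

lemma pvMaxF_eq_of (l : List Char) (K : Int) (c : Char) (hc : c ∈ l) (hv : pvVal c = K)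
    (hK : 0 ≤ K) (hub : ∀ i ∈ l, pvVal i ≤ K) : pvMaxF l = K :=
  le_antisymm (pvMaxF_le K l hub 0 hK) (hv ▸ pvMaxF_mem_le l c hc 0)

-- B's scan over the base table computes that same maximum
lemma pvScan_eq_maxF (l : List Char) : pvScanB l pvBases = pvMaxF l := by
  unfold pvBases
  simp only [pvScanB]
  by_cases hF : 'F' ∈ l
  · rw [if_pos hF]
    refine (pvMaxF_eq_of l 16 'F' hF pvVal_F (by norm_num) ?_).symm
    intro i hi
    rcases pvChar_cases i with rfl|rfl|rfl|rfl|rfl|rfl|rfl|rfl|rfl|rfl|rfl|rfl|rfl|rfl|rfl|rfl|hd <;>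
      first
        | decide
        | exact le_trans (le_of_eq (pvVal_default i hd)) (by norm_num)
  rw [if_neg hF]
  by_cases hE : 'E' ∈ l
  · rw [if_pos hE]
    refine (pvMaxF_eq_of l 15 'E' hE pvVal_E (by norm_num) ?_).symm
    intro i hi
    rcases pvChar_cases i with rfl|rfl|rfl|rfl|rfl|rfl|rfl|rfl|rfl|rfl|rfl|rfl|rfl|rfl|rfl|rfl|hd <;>
      first
        | exact (hF hi).elim
        | decide
        | exact le_trans (le_of_eq (pvVal_default i hd)) (by norm_num)
  rw [if_neg hE]
  by_cases hD : 'D' ∈ l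
  · rw [if_pos hD]
    refine (pvMaxF_eq_of l 14 'D' hD pvVal_D (by norm_num) ?_).symm
    intro i hi
    rcases pvChar_cases i with rfl|rfl|rfl|rfl|rfl|rfl|rfl|rfl|rfl|rfl|rfl|rfl|rfl|rfl|rfl|rfl|hd <;>
      first
        | exact (hF hi).elim
        | exact (hE hi).elim
        | decide
        | exact le_trans (le_of_eq (pvVal_default i hd)) (by norm_num)
  rw [if_neg hD]
  by_cases hC : 'C' ∈ l
  · rw [if_pos hC]
    refine (pvMaxF_eq_of l 13 'C' hC pvVal_C (by norm_num) ?_).symm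
    intro i hi
    rcases pvChar_cases i with rfl|rfl|rfl|rfl|rfl|rfl|rfl|rfl|rfl|rfl|rfl|rfl|rfl|rfl|rfl|rfl|hd <;>
      first
        | exact (hF hi).elim
        | exact (hE hi).elim
        | exact (hD hi).elim
        | decide
        | exact le_trans (le_of_eq (pvVal_default i hd)) (by norm_num)
  rw [if_neg hC]
  by_cases hB : 'B' ∈ l
  · rw [if_pos hB]
    refine (pvMaxF_eq_of l 12 'B' hB pvVal_B (by norm_num) ?_).symm
    intro i hi
    rcases pvChar_cases i with rfl|rfl|rfl|rfl|rfl|rfl|rfl|rfl|rfl|rfl|rfl|rfl|rfl|rfl|rfl|rfl|hd <;>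
      first
        | exact (hF hi).elim
        | exact (hE hi).elim
        | exact (hD hi).elim
        | exact (hC hi).elim
        | decide
        | exact le_trans (le_of_eq (pvVal_default i hd)) (by norm_num)
  rw [if_neg hB]
  by_cases hA : 'A' ∈ l
  · rw [if_pos hA]
    refine (pvMaxF_eq_of l 11 'A' hA pvVal_A (by norm_num) ?_).symm
    intro i hi
    rcases pvChar_cases i with rfl|rfl|rfl|rfl|rfl|rfl|rfl|rfl|rfl|rfl|rfl|rfl|rfl|rfl|rfl|rfl|hd <;>
      first
        | exact (hF hi).elim
        | exact (hE hi).elim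
        | exact (hD hi).elim
        | exact (hC hi).elim
        | exact (hB hi).elim
        | decide
        | exact le_trans (le_of_eq (pvVal_default i hd)) (by norm_num)
  rw [if_neg hA]
  by_cases h9 : '9' ∈ l
  · rw [if_pos h9]
    refine (pvMaxF_eq_of l 10 '9' h9 pvVal_9 (by norm_num) ?_).symm
    intro i hi
    rcases pvChar_cases i with rfl|rfl|rfl|rfl|rfl|rfl|rfl|rfl|rfl|rfl|rfl|rfl|rfl|rfl|rfl|rfl|hd <;>
      first
        | exact (hF hi).elim
        | exact (hE hi).elim
        | exact (hD hi).elim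
        | exact (hC hi).elim
        | exact (hB hi).elim
        | exact (hA hi).elim
        | decide
        | exact le_trans (le_of_eq (pvVal_default i hd)) (by norm_num)
  rw [if_neg h9]
  by_cases h8 : '8' ∈ l
  · rw [if_pos h8]
    refine (pvMaxF_eq_of l 9 '8' h8 pvVal_8 (by norm_num) ?_).symm
    intro i hi
    rcases pvChar_cases i with rfl|rfl|rfl|rfl|rfl|rfl|rfl|rfl|rfl|rfl|rfl|rfl|rfl|rfl|rfl|rfl|hd <;>
      first
        | exact (hF hi).elim
        | exact (hE hi).elim
        | exact (hD hi).elim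
        | exact (hC hi).elim
        | exact (hB hi).elim
        | exact (hA hi).elim
        | exact (h9 hi).elim
        | decide
        | exact le_trans (le_of_eq (pvVal_default i hd)) (by norm_num)
  rw [if_neg h8]
  by_cases h7 : '7' ∈ l
  · rw [if_pos h7]
    refine (pvMaxF_eq_of l 8 '7' h7 pvVal_7 (by norm_num) ?_).symm
    intro i hi
    rcases pvChar_cases i with rfl|rfl|rfl|rfl|rfl|rfl|rfl|rfl|rfl|rfl|rfl|rfl|rfl|rfl|rfl|rfl|hd <;>
      first
        | exact (hF hi).elim
        | exact (hE hi).elim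
        | exact (hD hi).elim
        | exact (hC hi).elim
        | exact (hB hi).elim
        | exact (hA hi).elim
        | exact (h9 hi).elim
        | exact (h8 hi).elim
        | decide
        | exact le_trans (le_of_eq (pvVal_default i hd)) (by norm_num)
  rw [if_neg h7]
  by_cases h6 : '6' ∈ l
  · rw [if_pos h6]
    refine (pvMaxF_eq_of l 7 '6' h6 pvVal_6 (by norm_num) ?_).symm
    intro i hi
    rcases pvChar_cases i with rfl|rfl|rfl|rfl|rfl|rfl|rfl|rfl|rfl|rfl|rfl|rfl|rfl|rfl|rfl|rfl|hd <;>
      first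
        | exact (hF hi).elim
        | exact (hE hi).elim
        | exact (hD hi).elim
        | exact (hC hi).elim
        | exact (hB hi).elim
        | exact (hA hi).elim
        | exact (h9 hi).elim
        | exact (h8 hi).elim
        | exact (h7 hi).elim
        | decide
        | exact le_trans (le_of_eq (pvVal_default i hd)) (by norm_num)
  rw [if_neg h6]
  by_cases h5 : '5' ∈ l
  · rw [if_pos h5]
    refine (pvMaxF_eq_of l 6 '5' h5 pvVal_5 (by norm_num) ?_).symm
    intro i hi
    rcases pvChar_cases i with rfl|rfl|rfl|rfl|rfl|rfl|rfl|rfl|rfl|rfl|rfl|rfl|rfl|rfl|rfl|rfl|hd <;>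
      first
        | exact (hF hi).elim
        | exact (hE hi).elim
        | exact (hD hi).elim
        | exact (hC hi).elim
        | exact (hB hi).elim
        | exact (hA hi).elim
        | exact (h9 hi).elim
        | exact (h8 hi).elim
        | exact (h7 hi).elim
        | exact (h6 hi).elim
        | decide
        | exact le_trans (le_of_eq (pvVal_default i hd)) (by norm_num)
  rw [if_neg h5]
  by_cases h4 : '4' ∈ l
  · rw [if_pos h4]
    refine (pvMaxF_eq_of l 5 '4' h4 pvVal_4 (by norm_num) ?_).symm
    intro i hi
    rcases pvChar_cases i with rfl|rfl|rfl|rfl|rfl|rfl|rfl|rfl|rfl|rfl|rfl|rfl|rfl|rfl|rfl|rfl|hd <;>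
      first
        | exact (hF hi).elim
        | exact (hE hi).elim
        | exact (hD hi).elim
        | exact (hC hi).elim
        | exact (hB hi).elim
        | exact (hA hi).elim
        | exact (h9 hi).elim
        | exact (h8 hi).elim
        | exact (h7 hi).elim
        | exact (h6 hi).elim
        | exact (h5 hi).elim
        | decide
        | exact le_trans (le_of_eq (pvVal_default i hd)) (by norm_num)
  rw [if_neg h4]
  by_cases h3 : '3' ∈ l
  · rw [if_pos h3]
    refine (pvMaxF_eq_of l 4 '3' h3 pvVal_3 (by norm_num) ?_).symm
    intro i hi
    rcases pvChar_cases i with rfl|rfl|rfl|rfl|rfl|rfl|rfl|rfl|rfl|rfl|rfl|rfl|rfl|rfl|rfl|rfl|hd <;>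
      first
        | exact (hF hi).elim
        | exact (hE hi).elim
        | exact (hD hi).elim
        | exact (hC hi).elim
        | exact (hB hi).elim
        | exact (hA hi).elim
        | exact (h9 hi).elim
        | exact (h8 hi).elim
        | exact (h7 hi).elim
        | exact (h6 hi).elim
        | exact (h5 hi).elim
        | exact (h4 hi).elim
        | decide
        | exact le_trans (le_of_eq (pvVal_default i hd)) (by norm_num)
  rw [if_neg h3]
  by_cases h2 : '2' ∈ l
  · rw [if_pos h2]
    refine (pvMaxF_eq_of l 3 '2' h2 pvVal_2 (by norm_num) ?_).symm
    intro i hi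
    rcases pvChar_cases i with rfl|rfl|rfl|rfl|rfl|rfl|rfl|rfl|rfl|rfl|rfl|rfl|rfl|rfl|rfl|rfl|hd <;>
      first
        | exact (hF hi).elim
        | exact (hE hi).elim
        | exact (hD hi).elim
        | exact (hC hi).elim
        | exact (hB hi).elim
        | exact (hA hi).elim
        | exact (h9 hi).elim
        | exact (h8 hi).elim
        | exact (h7 hi).elim
        | exact (h6 hi).elim
        | exact (h5 hi).elim
        | exact (h4 hi).elim
        | exact (h3 hi).elim
        | decide
        | exact le_trans (le_of_eq (pvVal_default i hd)) (by norm_num)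
  rw [if_neg h2]
  by_cases h01 : '0' ∈ l ∨ '1' ∈ l
  · rw [if_pos h01]
    rcases h01 with h0 | h1
    · refine (pvMaxF_eq_of l 2 '0' h0 pvVal_0 (by norm_num) ?_).symm
      intro i hi
      rcases pvChar_cases i with rfl|rfl|rfl|rfl|rfl|rfl|rfl|rfl|rfl|rfl|rfl|rfl|rfl|rfl|rfl|rfl|hd <;>
        first
          | exact (hF hi).elim
          | exact (hE hi).elim
          | exact (hD hi).elim
          | exact (hC hi).elim
          | exact (hB hi).elim
          | exact (hA hi).elim
          | exact (h9 hi).elim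
          | exact (h8 hi).elim
          | exact (h7 hi).elim
          | exact (h6 hi).elim
          | exact (h5 hi).elim
          | exact (h4 hi).elim
          | exact (h3 hi).elim
          | exact (h2 hi).elim
          | decide
          | exact le_trans (le_of_eq (pvVal_default i hd)) (by norm_num)
    · refine (pvMaxF_eq_of l 2 '1' h1 pvVal_1 (by norm_num) ?_).symm
      intro i hi
      rcases pvChar_cases i with rfl|rfl|rfl|rfl|rfl|rfl|rfl|rfl|rfl|rfl|rfl|rfl|rfl|rfl|rfl|rfl|hd <;>
        first
          | exact (hF hi).elim
          | exact (hE hi).elim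
          | exact (hD hi).elim
          | exact (hC hi).elim
          | exact (hB hi).elim
          | exact (hA hi).elim
          | exact (h9 hi).elim
          | exact (h8 hi).elim
          | exact (h7 hi).elim
          | exact (h6 hi).elim
          | exact (h5 hi).elim
          | exact (h4 hi).elim
          | exact (h3 hi).elim
          | exact (h2 hi).elim
          | decide
          | exact le_trans (le_of_eq (pvVal_default i hd)) (by norm_num)
  rw [if_neg h01]
  refine (le_antisymm (pvMaxF_le 0 l ?_ 0 le_rfl) (pvMaxF_init_le l 0)).symm
  intro i hi
  rcases pvChar_cases i with rfl|rfl|rfl|rfl|rfl|rfl|rfl|rfl|rfl|rfl|rfl|rfl|rfl|rfl|rfl|rfl|hd <;>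
    first
      | exact (hF hi).elim
      | exact (hE hi).elim
      | exact (hD hi).elim
      | exact (hC hi).elim
      | exact (hB hi).elim
      | exact (hA hi).elim
      | exact (h9 hi).elim
      | exact (h8 hi).elim
      | exact (h7 hi).elim
      | exact (h6 hi).elim
      | exact (h5 hi).elim
      | exact (h4 hi).elim
      | exact (h3 hi).elim
      | exact (h2 hi).elim
      | exact (h01 (Or.inl hi)).elim
      | exact (h01 (Or.inr hi)).elim
      | decide
      | exact le_trans (le_of_eq (pvVal_default i hd)) (by norm_num)

-- ===== VERDICT (by name: the statement is the Claim_ definition above) =====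
theorem jaki_system_spec : Claim_equal_jaki_system := by
  intro n _
  unfold Spec_jaki_system jaki_system jaki_system_alt
  rw [pvScan_eq_maxF, pvFoldA_eq n.toList 0 le_rfl]
  rfl
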